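-- pv_equiv track=rewrite | github.com/allrob23/pymop-artifacts-rv | pymop/pythonmop/monitor/formalismhandler/base.py | compute_coenable_sets
-- ===== SOURCE A (Python) =====
-- def compute_coenable_sets(states, events, transitions, goal_states):
--     """
--     Compute the coenable sets for a given FSM. A coenable set for an event e contains all sets of events
--     that can lead to a goal state after e occurs.
--
--     Args:
--         states: Set of states in the FSM.
--         events: Set of events in the FSM.
--         transitions: Transition function as a dictionary
--                     where transitions[s][e] = next_state.
--         goal_states: List of goal states where the match condition is met.
--
--     Returns:
--         The calculated coenable sets for each event. For each event e, returns a set of frozensets,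
--         where each frozenset contains events that can reach a goal state after e.
--     """
--
--     # Initialize SEEABLE sets for each state
--     # SEEABLE(s) contains sets of events that can reach a goal state from state s
--     seeable = {state: set() for state in states}
--     for g in goal_states:
--         # Goal states can reach themselves with no additional events, therefore a frozenset with an empty set. is added.
--         seeable[g] = {frozenset()}
--
--     # Work backwards from goal states to compute all possible event sequences
--     # Use a while loop to iterate until no more changes are made
--     changed = True
--     while changed:
--         changed = False
--         for state in states:
--             # For each transition from current state
--             for event, next_state in transitions.get(state, {}).items():
--                 # For each known sequence that reaches goal from next_state
--                 # We use list() to create a copy to avoid modifying while iterating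
--                 for seq in list(seeable[next_state]):
--                     # Add current event to sequence and create new frozen set
--                     new_seq = frozenset({event}) | seq
--                     # If this is a new sequence for current state, add it
--                     if new_seq not in seeable[state]:
--                         seeable[state].add(new_seq)
--                         changed = True
--
--     # Compute COENABLE sets for each event
--     # COENABLE(e) contains all event sequences that can reach goal after e occurs
--     coenable_sets = {event: set() for event in events}
--     for state in states:
--         for event, next_state in transitions.get(state, {}).items():
--             # Add all seeable sequences from next_state to this event's coenable set
--             coenable_sets[event].update(seeable[next_state])
--
--     # Remove empty sets from coenable sets
--     for event in coenable_sets: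
--         coenable_sets[event] = {s for s in coenable_sets[event] if s}
--
--     # Return the coenable sets for each event
--     return coenable_sets
-- ===== SOURCE B (Python) =====
-- def compute_coenable_sets(states, events, transitions, goal_states):
--     """Worklist re-implementation: precompute a predecessor index, seed the
--     goal states, and propagate each newly discovered event-set exactly once."""
--     # Predecessor index: target state -> list of (source_state, event) edges into it.
--     preds = {}
--     for s in states:
--         for e, t in transitions.get(s, {}).items():
--             preds.setdefault(t, []).append((s, e))
--
--     seeable = {s: set() for s in states}
--     stack = []
--     for g in goal_states:
--         seeable[g] = {frozenset()}
--         stack.append((g, frozenset()))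
--
--     # Each (state, seq) pair is processed once, when first discovered.
--     while stack:
--         t, seq = stack.pop()
--         for s, e in preds.get(t, []):
--             new_seq = seq | frozenset({e})
--             if new_seq not in seeable[s]:
--                 seeable[s].add(new_seq)
--                 stack.append((s, new_seq))
--
--     # COENABLE(e): union of SEEABLE(target) over every edge labelled e.
--     coenable_sets = {e: set() for e in events}
--     for t, edges in preds.items():
--         for s, e in edges:
--             coenable_sets[e].update(seeable[t])
--
--     return {e: {x for x in coenable_sets[e] if x} for e in coenable_sets}
-- ===== Notes on version B (the rewrite author's own statement) =====
-- stated objective: faster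
-- what changed: Replaced the repeat-until-stable full rescan of all states (chaotic fixpoint iteration) by a worklist algorithm over a precomputed predecessor index that propagates each newly discovered event-set exactly once, and computed the coenable union from the predecessor index.
import Mathlib
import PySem

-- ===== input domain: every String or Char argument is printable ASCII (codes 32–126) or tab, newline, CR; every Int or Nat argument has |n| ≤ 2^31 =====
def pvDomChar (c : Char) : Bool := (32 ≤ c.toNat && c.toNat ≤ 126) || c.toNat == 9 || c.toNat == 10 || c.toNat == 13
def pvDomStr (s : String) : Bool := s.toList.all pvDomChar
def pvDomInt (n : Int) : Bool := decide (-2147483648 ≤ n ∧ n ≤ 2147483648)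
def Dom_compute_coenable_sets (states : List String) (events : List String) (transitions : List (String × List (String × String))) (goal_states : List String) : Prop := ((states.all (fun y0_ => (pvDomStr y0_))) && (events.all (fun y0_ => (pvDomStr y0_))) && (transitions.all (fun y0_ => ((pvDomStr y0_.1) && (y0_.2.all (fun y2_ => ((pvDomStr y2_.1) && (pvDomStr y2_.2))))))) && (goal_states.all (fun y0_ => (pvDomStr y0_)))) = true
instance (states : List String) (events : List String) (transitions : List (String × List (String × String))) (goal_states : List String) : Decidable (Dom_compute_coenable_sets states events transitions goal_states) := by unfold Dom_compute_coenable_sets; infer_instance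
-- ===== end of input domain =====

-- B replaces A's repeat-until-stable rescans of all states by a worklist over a precomputed
-- predecessor index that propagates each newly discovered event-set once (objective: faster).
-- Python's set/frozenset iteration order is unspecified, so both ports model a frozenset as its
-- sorted duplicate-free element list and serialize each result set sorted (results are compared
-- as sets); the while/worklist loops are run on an explicit fuel that provably suffices.

-- ===== PORT A =====
-- helpers shared by both ports (identical lines of both Pythons):
-- frozenset({e}) | q, on the canonical sorted representation
def fzAdd (e : String) (q : List String) : List String :=
  if e ∈ q then q else List.orderedInsert (· ≤ ·) e q

-- transitions.get(s, {})  (iterated as .items())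
def trGet (transitions : List (String × List (String × String))) (s : String) : List (String × String) :=
  (PySem.Dict.mk transitions).getD s []

-- seeable[s]  (total form: inside Pre_ every accessed key is present)
def smGet (d : PySem.Dict String (PySem.Set (List String))) (s : String) : PySem.Set (List String) :=
  d.getD s []

-- seeable[s].add(q)
def smAdd (d : PySem.Dict String (PySem.Set (List String))) (s : String) (q : List String) :
    PySem.Dict String (PySem.Set (List String)) :=
  d.insert s (PySem.Set.add (smGet d s) q)

-- seeable = {s: set() for s in states};  for g in goal_states: seeable[g] = {frozenset()}
def initSeeable (states goal_states : List String) : PySem.Dict String (PySem.Set (List String)) :=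
  goal_states.foldl (fun d g => d.insert g (PySem.Set.ofList [[]]))
    (states.foldl (fun d s => d.insert s PySem.Set.empty) PySem.Dict.empty)

-- coenable_sets = {e: set() for e in events}
def coenInit (events : List String) : PySem.Dict String (PySem.Set (List String)) :=
  events.foldl (fun d e => d.insert e PySem.Set.empty) PySem.Dict.empty

-- a Python set of frozensets, serialized in canonical (sorted) order
def canonSet (s : PySem.Set (List String)) : List (List String) :=
  s.mergeSort (fun a b => decide (a ≤ b))

-- {s for s in c[e] if s}  then serialization
def canonOut (s : PySem.Set (List String)) : List (List String) :=
  canonSet (s.filter (fun q => !q.isEmpty))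

-- fuel for the saturation loops: #keys * 2^#labels bounds the number of possible additions
def seeKeys (states goal_states : List String) : List String :=
  PySem.Set.update (PySem.Set.ofList states) goal_states

def labelsOf (transitions : List (String × List (String × String))) : List String :=
  (transitions.flatMap (fun p => p.2)).map (fun q => q.1)

-- A-side:
-- innermost loop of A: for seq in list(seeable[next_state]): …
def stepA3 (s e : String) (p : PySem.Dict String (PySem.Set (List String)) × Bool) (q : List String) :
    PySem.Dict String (PySem.Set (List String)) × Bool :=
  let nq := fzAdd e q
  if nq ∈ smGet p.1 s then p else (smAdd p.1 s nq, true)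

-- for event, next_state in transitions.get(state, {}).items(): …
def stepA2 (s : String) (p : PySem.Dict String (PySem.Set (List String)) × Bool) (et : String × String) :
    PySem.Dict String (PySem.Set (List String)) × Bool :=
  (smGet p.1 et.2).foldl (stepA3 s et.1) p

-- one full 'for state in states' pass of the while-body, with the changed flag
def passA (states : List String) (transitions : List (String × List (String × String)))
    (d : PySem.Dict String (PySem.Set (List String))) :
    PySem.Dict String (PySem.Set (List String)) × Bool :=
  states.foldl (fun p s => (trGet transitions s).foldl (stepA2 s) p) (d, false)

-- while changed: …  (fuel-bounded; the fuel provably suffices)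
def loopA (states : List String) (transitions : List (String × List (String × String))) :
    Nat → PySem.Dict String (PySem.Set (List String)) → PySem.Dict String (PySem.Set (List String))
  | 0, d => d
  | n + 1, d =>
    let p := passA states transitions d
    if p.2 then loopA states transitions n p.1 else p.1

def fuelA (states : List String) (transitions : List (String × List (String × String)))
    (goal_states : List String) : Nat :=
  (seeKeys states goal_states).length * 2 ^ (labelsOf transitions).length + 1

def compute_coenable_sets (states : List String) (events : List String) (transitions : List (String × List (String × String))) (goal_states : List String) : List (String × List (List String)) :=
  let F := loopA states transitions (fuelA states transitions goal_states) (initSeeable states goal_states)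
  -- for state in states: for event, next_state in …: coenable_sets[event].update(seeable[next_state])
  let c := states.foldl (fun d s =>
    (trGet transitions s).foldl (fun d et =>
      d.insert et.1 (PySem.Set.update (d.getD et.1 []) (smGet F et.2))) d) (coenInit events)
  -- return {event: {s for s in coenable_sets[event] if s} for event in coenable_sets}
  c.items.map (fun p => (p.1, canonOut p.2))

-- ===== PORT B =====
-- preds = {}; for s in states: for e, t in transitions.get(s, {}).items(): preds.setdefault(t, []).append((s, e))
def predsOf (states : List String) (transitions : List (String × List (String × String))) :
    PySem.Dict String (List (String × String)) :=
  states.foldl (fun d s =>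
    (trGet transitions s).foldl (fun d et => d.modify et.2 [] (fun l => l ++ [(s, et.1)])) d)
    PySem.Dict.empty

-- body of 'for s, e in preds.get(t, [])' for the popped (t, q): accumulates the new pushes
def stepB (q : List String) (p : PySem.Dict String (PySem.Set (List String)) × List (String × List String))
    (se : String × String) :
    PySem.Dict String (PySem.Set (List String)) × List (String × List String) :=
  let nq := fzAdd se.2 q
  if nq ∈ smGet p.1 se.1 then p else (smAdd p.1 se.1 nq, p.2 ++ [(se.1, nq)])

-- while stack: t, seq = stack.pop(); …  (head of the list = top of the stack; fuel-bounded)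
def loopB (preds : PySem.Dict String (List (String × String))) :
    Nat → PySem.Dict String (PySem.Set (List String)) → List (String × List String) →
    PySem.Dict String (PySem.Set (List String))
  | 0, d, _ => d
  | _ + 1, d, [] => d
  | n + 1, d, tq :: rest =>
    let r := (preds.getD tq.1 []).foldl (stepB tq.2) (d, [])
    loopB preds n r.1 (r.2.reverse ++ rest)

def fuelB (states : List String) (transitions : List (String × List (String × String)))
    (goal_states : List String) : Nat :=
  (seeKeys states goal_states).length * 2 ^ (labelsOf transitions).length + goal_states.length + 1

def compute_coenable_sets_alt (states : List String) (events : List String) (transitions : List (String × List (String × String))) (goal_states : List String) : List (String × List (List String)) :=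
  let preds := predsOf states transitions
  -- for g in goal_states: seeable[g] = {frozenset()}; stack.append((g, frozenset()))
  let F := loopB preds (fuelB states transitions goal_states) (initSeeable states goal_states)
    (goal_states.map (fun g => (g, [])))
  -- for t, edges in preds.items(): for s, e in edges: coenable_sets[e].update(seeable[t])
  let c := preds.items.foldl (fun d tl =>
    tl.2.foldl (fun d se =>
      d.insert se.2 (PySem.Set.update (d.getD se.2 []) (smGet F tl.1))) d) (coenInit events)
  c.items.map (fun p => (p.1, canonOut p.2))

-- ===== PRECONDITION & SPEC =====
-- Pre_ excludes exactly the inputs on which A raises KeyError: a transition reachable from a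
-- state whose event label is not in events or whose target state is neither a state nor a goal.
def Pre_compute_coenable_sets (states : List String) (events : List String) (transitions : List (String × List (String × String))) (goal_states : List String) : Prop :=
  ∀ s ∈ states, ∀ et ∈ trGet transitions s, et.1 ∈ events ∧ (et.2 ∈ states ∨ et.2 ∈ goal_states)
instance (states : List String) (events : List String) (transitions : List (String × List (String × String))) (goal_states : List String) : Decidable (Pre_compute_coenable_sets states events transitions goal_states) := by unfold Pre_compute_coenable_sets; infer_instance

def pvWitness_compute_coenable_sets : List String × List String × (List (String × List (String × String))) × List String :=
  (["a", "b"], ["e", "f"], [("a", [("e", "b")]), ("b", [("f", "g")])], ["g"])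

def Spec_compute_coenable_sets (states : List String) (events : List String) (transitions : List (String × List (String × String))) (goal_states : List String) (out : List (String × List (List String))) : Prop := out = compute_coenable_sets_alt states events transitions goal_states
instance (states : List String) (events : List String) (transitions : List (String × List (String × String))) (goal_states : List String) (out : List (String × List (List String))) : Decidable (Spec_compute_coenable_sets states events transitions goal_states out) := by unfold Spec_compute_coenable_sets; infer_instance

-- ===== CLAIM (what is proved, stated in full; the proofs are below) =====
def Claim_equal_compute_coenable_sets : Prop := ∀ (states : List String) (events : List String) (transitions : List (String × List (String × String))) (goal_states : List String), Dom_compute_coenable_sets states events transitions goal_states → Pre_compute_coenable_sets states events transitions goal_states → Spec_compute_coenable_sets states events transitions goal_states (compute_coenable_sets states events transitions goal_states)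

-- ===== LEMMAS AND PROOFS =====


-- Derivability of an event-set at a state (the common semantics of both fixpoint computations)
inductive Reach (states : List String) (transitions : List (String × List (String × String))) (goal_states : List String) : String → List String → Prop
  | base (g : String) (hg : g ∈ goal_states) : Reach states transitions goal_states g []
  | step (s e t : String) (q : List String) (hs : s ∈ states) (het : (e, t) ∈ trGet transitions s)
      (h : Reach states transitions goal_states t q) : Reach states transitions goal_states s (fzAdd e q)

def Canon (q : List String) : Prop := q.Pairwise (· < ·)

def SndI (ST : List String) (TR : List (String × List (String × String))) (Gz : List String)
    (d : PySem.Dict String (PySem.Set (List String))) : Prop :=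
  ∀ s q, q ∈ smGet d s → Reach ST TR Gz s q

def NdI (d : PySem.Dict String (PySem.Set (List String))) : Prop := ∀ s, (smGet d s).Nodup

def BaseI (Gz : List String) (d : PySem.Dict String (PySem.Set (List String))) : Prop :=
  ∀ g ∈ Gz, [] ∈ smGet d g

def ClosedI (ST : List String) (TR : List (String × List (String × String)))
    (d : PySem.Dict String (PySem.Set (List String))) : Prop :=
  ∀ s ∈ ST, ∀ et ∈ trGet TR s, ∀ q ∈ smGet d et.2, fzAdd et.1 q ∈ smGet d s

def ExtD (d d' : PySem.Dict String (PySem.Set (List String))) : Prop := ∀ s, smGet d s ⊆ smGet d' s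

def Msz (ks : List String) (d : PySem.Dict String (PySem.Set (List String))) : Nat :=
  (ks.map (fun s => (smGet d s).length)).sum

theorem ExtD_refl (d : PySem.Dict String (PySem.Set (List String))) : ExtD d d := fun _ _ h => h

theorem ExtD_trans {d1 d2 d3 : PySem.Dict String (PySem.Set (List String))}
    (h1 : ExtD d1 d2) (h2 : ExtD d2 d3) : ExtD d1 d3 := fun s => (h1 s).trans (h2 s)

theorem smGet_smAdd (d : PySem.Dict String (PySem.Set (List String))) (s s' : String) (q : List String) :
    smGet (smAdd d s q) s' = if s' = s then PySem.Set.add (smGet d s) q else smGet d s' := by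
  simp [smAdd, smGet, PySem.Dict.getD_insert]

theorem mem_fzAdd (e x : String) (q : List String) : x ∈ fzAdd e q ↔ x = e ∨ x ∈ q := by
  unfold fzAdd
  split
  · rename_i h
    constructor
    · exact fun hx => Or.inr hx
    · rintro (rfl | hx) <;> [exact h; exact hx]
  · rw [(List.perm_orderedInsert _ e q).mem_iff, List.mem_cons]

theorem canon_orderedInsert (e : String) (q : List String) (hq : Canon q) (he : e ∉ q) :
    Canon (List.orderedInsert (· ≤ ·) e q) := by
  induction q with
  | nil => simp [Canon, List.orderedInsert]
  | cons b l ih =>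
    have hb : Canon l := hq.tail
    have hne : e ≠ b := fun h => he (h ▸ List.mem_cons_self)
    have hel : e ∉ l := fun h => he (List.mem_cons_of_mem _ h)
    simp only [List.orderedInsert]
    split
    · rename_i hle
      exact List.Pairwise.cons
        (by
          intro x hx
          rcases List.mem_cons.mp hx with rfl | hx
          · exact lt_of_le_of_ne hle hne
          · exact lt_of_le_of_lt (lt_of_le_of_ne hle hne).le (List.rel_of_pairwise_cons hq hx))
        hq
    · rename_i hnle
      have hbe : b < e := lt_of_not_ge hnle
      exact List.Pairwise.cons
        (by
          intro x hx
          rw [(List.perm_orderedInsert _ e l).mem_iff, List.mem_cons] at hx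
          rcases hx with rfl | hx
          · exact hbe
          · exact List.rel_of_pairwise_cons hq hx)
        (ih hb hel)

theorem canon_fzAdd (e : String) (q : List String) (hq : Canon q) : Canon (fzAdd e q) := by
  unfold fzAdd
  split
  · exact hq
  · exact canon_orderedInsert e q hq (by assumption)

theorem trGet_label {TR : List (String × List (String × String))} {s : String}
    {et : String × String} (h : et ∈ trGet TR s) : et.1 ∈ labelsOf TR := by
  unfold trGet at h
  rw [PySem.Dict.getD_eq_get?_getD] at h
  rcases hg : (PySem.Dict.mk TR).get? s with _ | v <;> rw [hg] at h
  · simp at h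
  · simp only [Option.getD_some] at h
    have hmem : (s, v) ∈ (PySem.Dict.mk TR).items := PySem.Dict.mem_items_of_get?_eq_some _ hg
    have : (s, v) ∈ TR := hmem
    unfold labelsOf
    exact List.mem_map_of_mem (List.mem_flatMap.mpr ⟨(s, v), this, h⟩)

theorem Reach_canon {ST Gz : List String} {TR : List (String × List (String × String))}
    {s : String} {q : List String} (h : Reach ST TR Gz s q) :
    Canon q ∧ ∀ x ∈ q, x ∈ labelsOf TR := by
  induction h with
  | base g hg => exact ⟨List.Pairwise.nil, by simp⟩
  | step s e t q hs het h ih =>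
    refine ⟨canon_fzAdd e q ih.1, ?_⟩
    intro x hx
    rcases (mem_fzAdd e x q).mp hx with rfl | hx
    · exact trGet_label het
    · exact ih.2 x hx

-- canonical lists over a strictly sorted universe are its sublists
theorem sorted_subset_sublist (q U : List String) (hq : q.Pairwise (· < ·))
    (hU : U.Pairwise (· < ·)) (hs : q ⊆ U) : q.Sublist U := by
  induction U generalizing q with
  | nil =>
    cases q with
    | nil => simp
    | cons a t => exact absurd (hs List.mem_cons_self) (by simp)
  | cons u U ih =>
    cases q with
    | nil => simp
    | cons a t =>
      by_cases hau : a = u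
      · subst hau
        refine List.Sublist.cons₂ _ (ih t hq.tail hU.tail ?_)
        intro x hx
        rcases List.mem_cons.mp (hs (List.mem_cons_of_mem _ hx)) with rfl | h2
        · exact absurd (List.rel_of_pairwise_cons hq hx) (lt_irrefl _)
        · exact h2
      · refine List.Sublist.cons _ (ih (a :: t) hq hU.tail ?_)
        intro x hx
        rcases List.mem_cons.mp (hs hx) with hxu | h2
        · exfalso
          rcases List.mem_cons.mp hx with rfl | hxt
          · exact hau hxu
          · have hax : a < x := List.rel_of_pairwise_cons hq hxt
            rcases List.mem_cons.mp (hs List.mem_cons_self) with h3 | h3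
            · exact hau h3
            · have hua : u < a := List.rel_of_pairwise_cons hU h3
              rw [hxu] at hax
              exact lt_irrefl _ (lt_trans hua hax)
        · exact h2

def UsOf (TR : List (String × List (String × String))) : List String :=
  (PySem.Set.ofList (labelsOf TR)).mergeSort (fun a b => decide (a ≤ b))

theorem UsOf_lt (TR : List (String × List (String × String))) : (UsOf TR).Pairwise (· < ·) := by
  have hperm := List.mergeSort_perm (PySem.Set.ofList (labelsOf TR)) (fun a b => decide (a ≤ b))
  have hnd : (UsOf TR).Nodup := hperm.nodup_iff.mpr (PySem.Set.nodup_ofList _)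
  have hle := List.pairwise_mergeSort
    (le := fun a b : String => decide (a ≤ b))
    (fun a b c hab hbc => decide_eq_true (le_trans (of_decide_eq_true hab) (of_decide_eq_true hbc)))
    (fun a b => by rcases le_total a b with h | h <;> simp [h])
    (PySem.Set.ofList (labelsOf TR))
  have := List.pairwise_and_iff.mpr ⟨hle, List.nodup_iff_pairwise_ne.mp hnd⟩
  exact this.imp (fun h => lt_of_le_of_ne (of_decide_eq_true h.1) h.2)

theorem mem_UsOf (TR : List (String × List (String × String))) (x : String) :
    x ∈ UsOf TR ↔ x ∈ labelsOf TR := by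
  unfold UsOf
  rw [(List.mergeSort_perm _ _).mem_iff]
  exact PySem.Set.mem_ofList _ _

theorem UsOf_len (TR : List (String × List (String × String))) :
    (UsOf TR).length ≤ (labelsOf TR).length := by
  unfold UsOf
  rw [(List.mergeSort_perm _ _).length_eq]
  exact PySem.Set.length_ofList_le _

-- any Nodup set of derivable event-sets is small
theorem value_bound {TR : List (String × List (String × String))}
    (v : List (List String)) (hnd : v.Nodup)
    (hv : ∀ q ∈ v, Canon q ∧ ∀ x ∈ q, x ∈ labelsOf TR) :
    v.length ≤ 2 ^ (labelsOf TR).length := by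
  have hsub : v ⊆ (UsOf TR).sublists := by
    intro q hq
    rw [List.mem_sublists]
    exact sorted_subset_sublist q _ (hv q hq).1 (UsOf_lt TR)
      (fun x hx => (mem_UsOf TR x).mpr ((hv q hq).2 x hx))
  calc v.length ≤ (UsOf TR).sublists.length := (List.subperm_of_subset hnd hsub).length_le
    _ = 2 ^ (UsOf TR).length := List.length_sublists _
    _ ≤ 2 ^ (labelsOf TR).length := Nat.pow_le_pow_right (by norm_num) (UsOf_len TR)

theorem Msz_le (ks : List String) (d : PySem.Dict String (PySem.Set (List String))) (B : Nat)
    (h : ∀ s ∈ ks, (smGet d s).length ≤ B) : Msz ks d ≤ ks.length * B := by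
  induction ks with
  | nil => simp [Msz]
  | cons k ks ih =>
    simp only [Msz, List.map_cons, List.sum_cons, List.length_cons]
    have := ih (fun s hs => h s (List.mem_cons_of_mem _ hs))
    have hk := h k List.mem_cons_self
    simp only [Msz] at this
    nlinarith

theorem Msz_smAdd (ks : List String) (d : PySem.Dict String (PySem.Set (List String)))
    (s : String) (q : List String) (hnd : ks.Nodup) (hs : s ∈ ks) (hq : q ∉ smGet d s) :
    Msz ks (smAdd d s q) = Msz ks d + 1 := by
  induction ks with
  | nil => simp at hs
  | cons k ks ih =>
    simp only [Msz, List.map_cons, List.sum_cons]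
    rcases List.mem_cons.mp hs with rfl | hs'
    · have hk : ∀ x ∈ ks, x ≠ s := fun x hx h => (List.nodup_cons.mp hnd).1 (h ▸ hx)
      rw [smGet_smAdd, if_pos rfl, PySem.Set.add_of_not_mem hq, List.length_append]
      have : ks.map (fun x => (smGet (smAdd d s q) x).length) = ks.map (fun x => (smGet d x).length) := by
        apply List.map_congr_left
        intro x hx
        rw [smGet_smAdd, if_neg (hk x hx)]
      simp only [Msz] at *
      rw [this]
      simp
      omega
    · have hks : k ≠ s := fun h => (List.nodup_cons.mp hnd).1 (h ▸ hs')
      rw [smGet_smAdd, if_neg hks]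
      have := ih (List.nodup_cons.mp hnd).2 hs'
      simp only [Msz] at this
      omega

theorem mem_seeKeys {ST Gz : List String} {s : String} (h : s ∈ ST ∨ s ∈ Gz) :
    s ∈ seeKeys ST Gz := by
  unfold seeKeys
  rw [PySem.Set.mem_update]
  rcases h with h | h
  · exact Or.inl ((PySem.Set.mem_ofList _ _).mpr h)
  · exact Or.inr h

theorem nodup_seeKeys (ST Gz : List String) : (seeKeys ST Gz).Nodup := by
  unfold seeKeys
  apply PySem.Set.nodup_update
  exact PySem.Set.nodup_ofList _

theorem Msz_bound {ST Gz : List String} {TR : List (String × List (String × String))}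
    {d : PySem.Dict String (PySem.Set (List String))}
    (hS : SndI ST TR Gz d) (hN : NdI d) :
    Msz (seeKeys ST Gz) d ≤ (seeKeys ST Gz).length * 2 ^ (labelsOf TR).length := by
  apply Msz_le
  intro s _
  exact value_bound _ (hN s) (fun q hq => Reach_canon (hS s q hq))

-- initial seeable
theorem const_insert_getD (l : List String) (v : PySem.Set (List String))
    (d : PySem.Dict String (PySem.Set (List String))) (s : String) :
    (l.foldl (fun d g => d.insert g v) d).getD s [] = if s ∈ l then v else d.getD s [] := by
  induction l generalizing d with
  | nil => simp
  | cons g l ih =>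
    simp only [List.foldl_cons, List.mem_cons]
    rw [ih]
    by_cases hsl : s ∈ l
    · simp [hsl]
    · by_cases hsg : s = g
      · simp [hsg]
      · simp [hsl, hsg, PySem.Dict.getD_insert]

theorem smGet_init (ST Gz : List String) (s : String) :
    smGet (initSeeable ST Gz) s = if s ∈ Gz then [[]] else [] := by
  unfold initSeeable smGet
  rw [const_insert_getD, const_insert_getD]
  rcases em (s ∈ Gz) with h | h <;> rcases em (s ∈ ST) with h2 | h2 <;>
    simp [h, h2, PySem.Set.ofList, PySem.Dict.getD_empty, PySem.Set.empty]


-- ===== A-side: the chaotic-iteration pass =====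
theorem fold3_spec (ST Gz : List String) (TR : List (String × List (String × String)))
    (s e t : String) (hs : s ∈ ST) (het : (e, t) ∈ trGet TR s)
    (Q : List (List String)) (hQ : ∀ q ∈ Q, Reach ST TR Gz t q) :
    ∀ p : PySem.Dict String (PySem.Set (List String)) × Bool,
      SndI ST TR Gz p.1 → NdI p.1 →
      SndI ST TR Gz (Q.foldl (stepA3 s e) p).1 ∧
      NdI (Q.foldl (stepA3 s e) p).1 ∧
      ExtD p.1 (Q.foldl (stepA3 s e) p).1 ∧
      Msz (seeKeys ST Gz) p.1 ≤ Msz (seeKeys ST Gz) (Q.foldl (stepA3 s e) p).1 ∧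
      (((Q.foldl (stepA3 s e) p).1 = p.1 ∧ (Q.foldl (stepA3 s e) p).2 = p.2) ∨
        ((Q.foldl (stepA3 s e) p).2 = true ∧
          Msz (seeKeys ST Gz) p.1 < Msz (seeKeys ST Gz) (Q.foldl (stepA3 s e) p).1)) ∧
      ((Q.foldl (stepA3 s e) p).2 = false →
        (Q.foldl (stepA3 s e) p).1 = p.1 ∧ ∀ q ∈ Q, fzAdd e q ∈ smGet p.1 s) := by
  induction Q with
  | nil =>
    intro p hS hN
    simp only [List.foldl_nil]
    exact ⟨hS, hN, ExtD_refl _, le_refl _, Or.inl ⟨by trivial, by trivial⟩, fun _ => ⟨by trivial, by intro x hx; simp at hx⟩⟩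
  | cons q Q ih =>
    intro p hS hN
    have hQ' : ∀ x ∈ Q, Reach ST TR Gz t x := fun x hx => hQ x (List.mem_cons_of_mem _ hx)
    simp only [List.foldl_cons]
    by_cases hmem : fzAdd e q ∈ smGet p.1 s
    · have hstep : stepA3 s e p q = p := by simp [stepA3, hmem]
      rw [hstep]
      obtain ⟨c1, c2, c3, c4, c5, c6⟩ := ih hQ' p hS hN
      refine ⟨c1, c2, c3, c4, c5, fun hf => ⟨(c6 hf).1, ?_⟩⟩
      intro x hx
      rcases List.mem_cons.mp hx with rfl | hx
      · exact hmem
      · exact (c6 hf).2 x hx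
    · have hstep : stepA3 s e p q = (smAdd p.1 s (fzAdd e q), true) := by simp [stepA3, hmem]
      rw [hstep]
      set p1 : PySem.Dict String (PySem.Set (List String)) × Bool := (smAdd p.1 s (fzAdd e q), true) with hp1
      have hRq : Reach ST TR Gz s (fzAdd e q) := Reach.step s e t q hs het (hQ q List.mem_cons_self)
      have hS1 : SndI ST TR Gz p1.1 := by
        intro s' q' hq'
        rw [hp1] at hq'
        simp only [smGet_smAdd] at hq'
        split at hq'
        · rcases (PySem.Set.mem_add _ _ _).mp hq' with h | rfl
          · rename_i hseq; subst hseq; exact hS _ _ h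
          · rename_i hseq; subst hseq; exact hRq
        · exact hS _ _ hq'
      have hN1 : NdI p1.1 := by
        intro s'
        rw [hp1]
        simp only [smGet_smAdd]
        split
        · exact PySem.Set.nodup_add _ _ (hN s)
        · exact hN s'
      have hE1 : ExtD p.1 p1.1 := by
        intro s' x hx
        rw [hp1]
        simp only [smGet_smAdd]
        split
        · rename_i hseq; subst hseq; exact (PySem.Set.mem_add _ _ _).mpr (Or.inl hx)
        · exact hx
      have hM1 : Msz (seeKeys ST Gz) p1.1 = Msz (seeKeys ST Gz) p.1 + 1 := by
        rw [hp1]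
        exact Msz_smAdd _ _ _ _ (nodup_seeKeys ST Gz) (mem_seeKeys (Or.inl hs)) hmem
      obtain ⟨c1, c2, c3, c4, c5, c6⟩ := ih hQ' p1 hS1 hN1
      refine ⟨c1, c2, ExtD_trans hE1 c3, by omega, ?_, ?_⟩
      · rcases c5 with ⟨h1, h2⟩ | ⟨h1, h2⟩
        · exact Or.inr ⟨by rw [h2], by omega⟩
        · exact Or.inr ⟨h1, by omega⟩
      · intro hf
        exfalso
        rcases c5 with ⟨_, h2⟩ | ⟨h1, _⟩
        · have h3 := h2.trans (show p1.2 = true from rfl)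
          rw [hf] at h3
          simp at h3
        · simp [hf] at h1

theorem fold2_spec (ST Gz : List String) (TR : List (String × List (String × String)))
    (s : String) (hs : s ∈ ST)
    (E : List (String × String)) (hE : ∀ et ∈ E, et ∈ trGet TR s) :
    ∀ p : PySem.Dict String (PySem.Set (List String)) × Bool,
      SndI ST TR Gz p.1 → NdI p.1 →
      SndI ST TR Gz (E.foldl (stepA2 s) p).1 ∧
      NdI (E.foldl (stepA2 s) p).1 ∧
      ExtD p.1 (E.foldl (stepA2 s) p).1 ∧
      Msz (seeKeys ST Gz) p.1 ≤ Msz (seeKeys ST Gz) (E.foldl (stepA2 s) p).1 ∧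
      (((E.foldl (stepA2 s) p).1 = p.1 ∧ (E.foldl (stepA2 s) p).2 = p.2) ∨
        ((E.foldl (stepA2 s) p).2 = true ∧
          Msz (seeKeys ST Gz) p.1 < Msz (seeKeys ST Gz) (E.foldl (stepA2 s) p).1)) ∧
      ((E.foldl (stepA2 s) p).2 = false →
        (E.foldl (stepA2 s) p).1 = p.1 ∧
          ∀ et ∈ E, ∀ q ∈ smGet p.1 et.2, fzAdd et.1 q ∈ smGet p.1 s) := by
  induction E with
  | nil =>
    intro p hS hN
    simp only [List.foldl_nil]
    exact ⟨hS, hN, ExtD_refl _, le_refl _, Or.inl ⟨by trivial, by trivial⟩, fun _ => ⟨by trivial, by intro x hx; simp at hx⟩⟩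
  | cons et E ih =>
    intro p hS hN
    have hE' : ∀ x ∈ E, x ∈ trGet TR s := fun x hx => hE x (List.mem_cons_of_mem _ hx)
    have hetm : (et.1, et.2) ∈ trGet TR s := by
      have := hE et List.mem_cons_self
      simpa using this
    simp only [List.foldl_cons]
    have hQ : ∀ q ∈ smGet p.1 et.2, Reach ST TR Gz et.2 q := fun q hq => hS _ _ hq
    have h3 := fold3_spec ST Gz TR s et.1 et.2 hs hetm (smGet p.1 et.2) hQ p hS hN
    obtain ⟨d1, d2, d3, d4, d5, d6⟩ := h3
    have hstep : stepA2 s p et = (smGet p.1 et.2).foldl (stepA3 s et.1) p := rfl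
    rw [hstep]
    set p1 := (smGet p.1 et.2).foldl (stepA3 s et.1) p with hp1
    obtain ⟨c1, c2, c3, c4, c5, c6⟩ := ih hE' p1 d1 d2
    refine ⟨c1, c2, ExtD_trans d3 c3, by omega, ?_, ?_⟩
    · rcases c5 with ⟨h1, h2⟩ | ⟨h1, h2⟩
      · rcases d5 with ⟨g1, g2⟩ | ⟨g1, g2⟩
        · exact Or.inl ⟨by rw [h1, g1], by rw [h2, g2]⟩
        · exact Or.inr ⟨by rw [h2, g1], by omega⟩
      · exact Or.inr ⟨h1, by omega⟩
    · intro hf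
      have hp1flag : p1.2 = false := by
        rcases c5 with ⟨_, h2⟩ | ⟨h1, _⟩
        · rw [← h2, hf]
        · rw [hf] at h1; exact absurd h1 (by simp)
      obtain ⟨he1, _⟩ := c6 hf
      obtain ⟨he2, hcl⟩ := d6 hp1flag
      refine ⟨by rw [he1, he2], ?_⟩
      intro x hx q hq
      rcases List.mem_cons.mp hx with rfl | hx
      · exact hcl q hq
      · have := (c6 hf).2 x hx q (by rw [he2]; exact hq)
        rw [he2] at this
        exact this

theorem pass_spec (ST Gz : List String) (TR : List (String × List (String × String)))
    (S : List String) (hSsub : ∀ x ∈ S, x ∈ ST) :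
    ∀ p : PySem.Dict String (PySem.Set (List String)) × Bool,
      SndI ST TR Gz p.1 → NdI p.1 →
      SndI ST TR Gz (S.foldl (fun p s => (trGet TR s).foldl (stepA2 s) p) p).1 ∧
      NdI (S.foldl (fun p s => (trGet TR s).foldl (stepA2 s) p) p).1 ∧
      ExtD p.1 (S.foldl (fun p s => (trGet TR s).foldl (stepA2 s) p) p).1 ∧
      Msz (seeKeys ST Gz) p.1 ≤ Msz (seeKeys ST Gz) (S.foldl (fun p s => (trGet TR s).foldl (stepA2 s) p) p).1 ∧
      (((S.foldl (fun p s => (trGet TR s).foldl (stepA2 s) p) p).1 = p.1 ∧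
          (S.foldl (fun p s => (trGet TR s).foldl (stepA2 s) p) p).2 = p.2) ∨
        ((S.foldl (fun p s => (trGet TR s).foldl (stepA2 s) p) p).2 = true ∧
          Msz (seeKeys ST Gz) p.1 < Msz (seeKeys ST Gz) (S.foldl (fun p s => (trGet TR s).foldl (stepA2 s) p) p).1)) ∧
      ((S.foldl (fun p s => (trGet TR s).foldl (stepA2 s) p) p).2 = false →
        (S.foldl (fun p s => (trGet TR s).foldl (stepA2 s) p) p).1 = p.1 ∧
          ∀ s ∈ S, ∀ et ∈ trGet TR s, ∀ q ∈ smGet p.1 et.2, fzAdd et.1 q ∈ smGet p.1 s) := by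
  induction S with
  | nil =>
    intro p hS hN
    simp only [List.foldl_nil]
    exact ⟨hS, hN, ExtD_refl _, le_refl _, Or.inl ⟨by trivial, by trivial⟩, fun _ => ⟨by trivial, by intro x hx; simp at hx⟩⟩
  | cons s S ih =>
    intro p hS hN
    have hsub' : ∀ x ∈ S, x ∈ ST := fun x hx => hSsub x (List.mem_cons_of_mem _ hx)
    have hsS : s ∈ ST := hSsub s List.mem_cons_self
    simp only [List.foldl_cons]
    have h2 := fold2_spec ST Gz TR s hsS (trGet TR s) (fun et het => het) p hS hN
    obtain ⟨d1, d2, d3, d4, d5, d6⟩ := h2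
    set p1 := (trGet TR s).foldl (stepA2 s) p with hp1
    obtain ⟨c1, c2, c3, c4, c5, c6⟩ := ih hsub' p1 d1 d2
    refine ⟨c1, c2, ExtD_trans d3 c3, by omega, ?_, ?_⟩
    · rcases c5 with ⟨h1, h2'⟩ | ⟨h1, h2'⟩
      · rcases d5 with ⟨g1, g2⟩ | ⟨g1, g2⟩
        · exact Or.inl ⟨by rw [h1, g1], by rw [h2', g2]⟩
        · exact Or.inr ⟨by rw [h2', g1], by omega⟩
      · exact Or.inr ⟨h1, by omega⟩
    · intro hf
      have hp1flag : p1.2 = false := by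
        rcases c5 with ⟨_, h2'⟩ | ⟨h1, _⟩
        · rw [← h2', hf]
        · rw [hf] at h1; exact absurd h1 (by simp)
      obtain ⟨he1, _⟩ := c6 hf
      obtain ⟨he2, hcl⟩ := d6 hp1flag
      refine ⟨by rw [he1, he2], ?_⟩
      intro x hx et het q hq
      rcases List.mem_cons.mp hx with rfl | hx
      · exact hcl et het q hq
      · have := (c6 hf).2 x hx et het q (by rw [he2]; exact hq)
        rw [he2] at this
        exact this

theorem reach_mem {ST Gz : List String} {TR : List (String × List (String × String))}
    {d : PySem.Dict String (PySem.Set (List String))}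
    (hC : ClosedI ST TR d) (hB : BaseI Gz d) :
    ∀ s q, Reach ST TR Gz s q → q ∈ smGet d s := by
  intro s q h
  induction h with
  | base g hg => exact hB g hg
  | step s e t q hs het h ih => exact hC s hs (e, t) het q ih

theorem loopA_spec (ST Gz : List String) (TR : List (String × List (String × String))) :
    ∀ (n : Nat) (d : PySem.Dict String (PySem.Set (List String))),
      SndI ST TR Gz d → NdI d → BaseI Gz d →
      (seeKeys ST Gz).length * 2 ^ (labelsOf TR).length + 1 ≤ n + Msz (seeKeys ST Gz) d →
      SndI ST TR Gz (loopA ST TR n d) ∧ NdI (loopA ST TR n d) ∧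
        BaseI Gz (loopA ST TR n d) ∧ ClosedI ST TR (loopA ST TR n d) := by
  intro n
  induction n with
  | zero =>
    intro d hS hN _ hfuel
    exact absurd (Msz_bound hS hN) (by omega)
  | succ n ih =>
    intro d hS hN hB hfuel
    have hp := pass_spec ST Gz TR ST (fun x hx => hx) (d, false) hS hN
    obtain ⟨c1, c2, c3, c4, c5, c6⟩ := hp
    show SndI ST TR Gz (loopA ST TR (n+1) d) ∧ _
    rw [loopA]
    have hpassA : passA ST TR d = ST.foldl (fun p s => (trGet TR s).foldl (stepA2 s) p) (d, false) := rfl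
    rw [hpassA]
    set p1 := ST.foldl (fun p s => (trGet TR s).foldl (stepA2 s) p) ((d, false) : PySem.Dict String (PySem.Set (List String)) × Bool) with hp1
    by_cases hflag : p1.2
    · rw [if_pos hflag]
      have hM : Msz (seeKeys ST Gz) d < Msz (seeKeys ST Gz) p1.1 := by
        rcases c5 with ⟨_, h2⟩ | ⟨_, h2⟩
        · rw [hflag] at h2; exact absurd h2.symm (by simp)
        · exact h2
      exact ih p1.1 c1 c2 (fun g hg => c3 g ((hB g hg))) (by omega)
    · rw [if_neg (by simpa using hflag)]
      have hf : p1.2 = false := by simpa using hflag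
      obtain ⟨he, hcl⟩ := c6 hf
      rw [he]
      exact ⟨hS, hN, hB, fun s hs et het q hq => hcl s hs et het q hq⟩


-- ===== B-side: predecessor index and worklist =====
theorem predsOf_eq (ST : List String) (TR : List (String × List (String × String))) :
    predsOf ST TR = (ST.flatMap (fun s => (trGet TR s).map (fun et => (et.2, (s, et.1))))).foldl
      (fun d p => d.modify p.1 [] (fun l => l ++ [p.2])) PySem.Dict.empty := by
  unfold predsOf
  rw [List.foldl_flatMap]
  congr 1
  funext d s
  rw [List.foldl_map]

theorem mem_predsGet (ST : List String) (TR : List (String × List (String × String)))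
    (t : String) (se : String × String) :
    se ∈ (predsOf ST TR).getD t [] ↔
      ∃ s ∈ ST, ∃ et ∈ trGet TR s, se = (s, et.1) ∧ et.2 = t := by
  rw [predsOf_eq, PySem.Dict.getD_foldl_modify_append]
  simp only [PySem.Dict.getD_empty, List.nil_append, List.mem_map, List.mem_filter,
    List.mem_flatMap, beq_iff_eq]
  constructor
  · rintro ⟨p, ⟨⟨s, hs, ⟨et, het, rfl⟩⟩, hpt⟩, rfl⟩
    exact ⟨s, hs, et, het, rfl, hpt⟩
  · rintro ⟨s, hs, et, het, rfl, h2⟩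
    exact ⟨(et.2, (s, et.1)), ⟨⟨s, hs, ⟨et, het, rfl⟩⟩, h2⟩, rfl⟩

theorem nodup_keys_preds (ST : List String) (TR : List (String × List (String × String))) :
    (predsOf ST TR).keys.Nodup := by
  rw [predsOf_eq]
  exact PySem.Dict.nodup_keys_foldl_modify_key
    (ST.flatMap (fun s => (trGet TR s).map (fun et => (et.2, (s, et.1)))))
    (fun p : String × (String × String) => p.1) []
    (fun _ p => fun l => l ++ [p.2]) PySem.Dict.empty PySem.Dict.nodup_keys_empty

def PendI (ST : List String) (TR : List (String × List (String × String)))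
    (d : PySem.Dict String (PySem.Set (List String))) (st : List (String × List String)) : Prop :=
  ∀ s ∈ ST, ∀ et ∈ trGet TR s, ∀ q ∈ smGet d et.2, fzAdd et.1 q ∈ smGet d s ∨ (et.2, q) ∈ st

theorem foldB_spec (ST Gz : List String) (TR : List (String × List (String × String)))
    (t : String) (q : List String) (hq : Reach ST TR Gz t q)
    (P : List (String × String)) (hP : ∀ se ∈ P, se.1 ∈ ST ∧ (se.2, t) ∈ trGet TR se.1) :
    ∀ p : PySem.Dict String (PySem.Set (List String)) × List (String × List String),
      SndI ST TR Gz p.1 → NdI p.1 →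
      SndI ST TR Gz (P.foldl (stepB q) p).1 ∧
      NdI (P.foldl (stepB q) p).1 ∧
      ExtD p.1 (P.foldl (stepB q) p).1 ∧
      Msz (seeKeys ST Gz) (P.foldl (stepB q) p).1 + p.2.length =
        Msz (seeKeys ST Gz) p.1 + (P.foldl (stepB q) p).2.length ∧
      (∀ se ∈ P, fzAdd se.2 q ∈ smGet (P.foldl (stepB q) p).1 se.1) ∧
      (∀ s x, x ∈ smGet (P.foldl (stepB q) p).1 s → x ∈ smGet p.1 s ∨ (s, x) ∈ (P.foldl (stepB q) p).2) ∧
      (∀ sx ∈ p.2, sx ∈ (P.foldl (stepB q) p).2) ∧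
      (∀ sx ∈ (P.foldl (stepB q) p).2, sx ∈ p.2 ∨ Reach ST TR Gz sx.1 sx.2) := by
  induction P with
  | nil =>
    intro p hS hN
    simp only [List.foldl_nil]
    exact ⟨hS, hN, ExtD_refl _, by trivial, by intro x hx; simp at hx,
      fun s x hx => Or.inl hx, fun sx hx => hx, fun sx hx => Or.inl hx⟩
  | cons se P ih =>
    intro p hS hN
    have hP' : ∀ x ∈ P, x.1 ∈ ST ∧ (x.2, t) ∈ trGet TR x.1 :=
      fun x hx => hP x (List.mem_cons_of_mem _ hx)
    have hse := hP se List.mem_cons_self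
    simp only [List.foldl_cons]
    by_cases hmem : fzAdd se.2 q ∈ smGet p.1 se.1
    · have hstep : stepB q p se = p := by simp [stepB, hmem]
      rw [hstep]
      obtain ⟨c1, c2, c3, c4, c5, c6, c7, c8⟩ := ih hP' p hS hN
      refine ⟨c1, c2, c3, c4, ?_, c6, c7, c8⟩
      intro x hx
      rcases List.mem_cons.mp hx with rfl | hx
      · exact c3 _ hmem
      · exact c5 x hx
    · have hstep : stepB q p se = (smAdd p.1 se.1 (fzAdd se.2 q), p.2 ++ [(se.1, fzAdd se.2 q)]) := by
        simp [stepB, hmem]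
      rw [hstep]
      set nq := fzAdd se.2 q with hnq
      set p1 : PySem.Dict String (PySem.Set (List String)) × List (String × List String) :=
        (smAdd p.1 se.1 nq, p.2 ++ [(se.1, nq)]) with hp1
      have hRq : Reach ST TR Gz se.1 nq := Reach.step se.1 se.2 t q hse.1 hse.2 hq
      have hS1 : SndI ST TR Gz p1.1 := by
        intro s' q' hq'
        simp only [hp1, smGet_smAdd] at hq'
        split at hq'
        · rcases (PySem.Set.mem_add _ _ _).mp hq' with h | rfl
          · rename_i hseq; subst hseq; exact hS _ _ h
          · rename_i hseq; subst hseq; exact hRq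
        · exact hS _ _ hq'
      have hN1 : NdI p1.1 := by
        intro s'
        simp only [hp1, smGet_smAdd]
        split
        · exact PySem.Set.nodup_add _ _ (hN se.1)
        · exact hN s'
      have hE1 : ExtD p.1 p1.1 := by
        intro s' x hx
        simp only [hp1, smGet_smAdd]
        split
        · rename_i hseq; subst hseq; exact (PySem.Set.mem_add _ _ _).mpr (Or.inl hx)
        · exact hx
      have hM1 : Msz (seeKeys ST Gz) p1.1 = Msz (seeKeys ST Gz) p.1 + 1 :=
        Msz_smAdd _ _ _ _ (nodup_seeKeys ST Gz) (mem_seeKeys (Or.inl hse.1)) hmem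
      have hL1 : p1.2.length = p.2.length + 1 := by simp [hp1]
      have hnqmem : nq ∈ smGet p1.1 se.1 := by
        simp only [hp1, smGet_smAdd]
        exact (PySem.Set.mem_add _ _ _).mpr (Or.inr rfl)
      obtain ⟨c1, c2, c3, c4, c5, c6, c7, c8⟩ := ih hP' p1 hS1 hN1
      refine ⟨c1, c2, ExtD_trans hE1 c3, by omega, ?_, ?_, ?_, ?_⟩
      · intro x hx
        rcases List.mem_cons.mp hx with rfl | hx
        · exact c3 _ hnqmem
        · exact c5 x hx
      · intro s x hx
        rcases c6 s x hx with h | h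
        · simp only [hp1, smGet_smAdd] at h
          split at h
          · rename_i hseq
            subst hseq
            rcases (PySem.Set.mem_add _ _ _).mp h with h2 | rfl
            · exact Or.inl h2
            · exact Or.inr (c7 _ (by simp [hp1]))
          · exact Or.inl h
        · exact Or.inr h
      · intro sx hx
        exact c7 _ (by simp [hp1, hx])
      · intro sx hx
        rcases c8 sx hx with h | h
        · simp only [hp1, List.mem_append, List.mem_singleton] at h
          rcases h with h | rfl
          · exact Or.inl h
          · exact Or.inr hRq
        · exact Or.inr h

theorem loopB_spec (ST Gz : List String) (TR : List (String × List (String × String))) :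
    ∀ (n : Nat) (d : PySem.Dict String (PySem.Set (List String))) (st : List (String × List String)),
      SndI ST TR Gz d → NdI d → BaseI Gz d →
      (∀ p ∈ st, Reach ST TR Gz p.1 p.2) →
      PendI ST TR d st →
      (seeKeys ST Gz).length * 2 ^ (labelsOf TR).length + 1 + st.length ≤ n + Msz (seeKeys ST Gz) d →
      SndI ST TR Gz (loopB (predsOf ST TR) n d st) ∧ NdI (loopB (predsOf ST TR) n d st) ∧
        BaseI Gz (loopB (predsOf ST TR) n d st) ∧ ClosedI ST TR (loopB (predsOf ST TR) n d st) := by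
  intro n
  induction n with
  | zero =>
    intro d st hS hN _ _ _ hfuel
    exact absurd (Msz_bound hS hN) (by omega)
  | succ n ih =>
    intro d st hS hN hB hstR hpend hfuel
    match st with
    | [] =>
      rw [loopB]
      refine ⟨hS, hN, hB, ?_⟩
      intro s hs et het x hx
      rcases hpend s hs et het x hx with h | h
      · exact h
      · simp at h
    | (t, q) :: rest =>
      rw [loopB]
      have hstT : Reach ST TR Gz t q := hstR (t, q) List.mem_cons_self
      have hP : ∀ se ∈ (predsOf ST TR).getD t [], se.1 ∈ ST ∧ (se.2, t) ∈ trGet TR se.1 := by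
        intro se hse
        rcases (mem_predsGet ST TR t se).mp hse with ⟨s, hs, et, het, rfl, h2⟩
        subst h2
        exact ⟨hs, by simpa using het⟩
      obtain ⟨c1, c2, c3, c4, c5, c6, c7, c8⟩ :=
        foldB_spec ST Gz TR t q hstT ((predsOf ST TR).getD t []) hP (d, []) hS hN
      set r := ((predsOf ST TR).getD t []).foldl (stepB q) (d, []) with hr
      have hB1 : BaseI Gz r.1 := fun g hg => c3 _ (hB g hg)
      have hstR1 : ∀ p ∈ r.2.reverse ++ rest, Reach ST TR Gz p.1 p.2 := by
        intro p hp
        rcases List.mem_append.mp hp with hp | hp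
        · rcases c8 p (List.mem_reverse.mp hp) with h | h
          · simp at h
          · exact h
        · exact hstR p (List.mem_cons_of_mem _ hp)
      have hpend1 : PendI ST TR r.1 (r.2.reverse ++ rest) := by
        intro s hs et het x hx
        rcases c6 et.2 x hx with h | h
        · rcases hpend s hs et het x h with h2 | h2
          · exact Or.inl (c3 _ h2)
          · rcases List.mem_cons.mp h2 with h3 | h3
            · have ht : et.2 = t := congrArg Prod.fst h3
              have hxq : x = q := congrArg Prod.snd h3
              subst hxq
              have hmem : (s, et.1) ∈ (predsOf ST TR).getD t [] := by
                rw [mem_predsGet]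
                exact ⟨s, hs, et, het, rfl, ht⟩
              exact Or.inl (c5 (s, et.1) hmem)
            · exact Or.inr (List.mem_append.mpr (Or.inr h3))
        · exact Or.inr (List.mem_append.mpr (Or.inl (List.mem_reverse.mpr h)))
      have hM : Msz (seeKeys ST Gz) r.1 = Msz (seeKeys ST Gz) d + r.2.length := by
        have := c4
        simp only [List.length_nil] at this
        omega
      have hlen : (r.2.reverse ++ rest).length = r.2.length + rest.length := by
        simp
      exact ih r.1 (r.2.reverse ++ rest) c1 c2 hB1 hstR1 hpend1 (by
        rw [hlen]
        simp only [List.length_cons] at hfuel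
        omega)


-- ===== the COENABLE phase =====
def cFold (l : List (String × String)) (F : PySem.Dict String (PySem.Set (List String)))
    (d0 : PySem.Dict String (PySem.Set (List String))) : PySem.Dict String (PySem.Set (List String)) :=
  l.foldl (fun d p => d.insert p.1 (PySem.Set.update (d.getD p.1 []) (smGet F p.2))) d0

theorem mem_cFold (l : List (String × String)) (F d0 : PySem.Dict String (PySem.Set (List String)))
    (e : String) (q : List String) :
    q ∈ (cFold l F d0).getD e [] ↔
      q ∈ d0.getD e [] ∨ ∃ p ∈ l, p.1 = e ∧ q ∈ smGet F p.2 := by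
  induction l generalizing d0 with
  | nil => simp [cFold]
  | cons p l ih =>
    have hstep : cFold (p :: l) F d0 =
        cFold l F (d0.insert p.1 (PySem.Set.update (d0.getD p.1 []) (smGet F p.2))) := rfl
    rw [hstep, ih]
    rw [PySem.Dict.getD_insert]
    by_cases he : e = p.1
    · subst he
      rw [if_pos rfl, PySem.Set.mem_update]
      constructor
      · rintro ((h | h) | ⟨x, hx, hxe, hq⟩)
        · exact Or.inl h
        · exact Or.inr ⟨p, List.mem_cons_self, rfl, h⟩
        · exact Or.inr ⟨x, List.mem_cons_of_mem _ hx, hxe, hq⟩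
      · rintro (h | ⟨x, hx, hxe, hq⟩)
        · exact Or.inl (Or.inl h)
        · rcases List.mem_cons.mp hx with rfl | hx2
          · exact Or.inl (Or.inr hq)
          · exact Or.inr ⟨x, hx2, hxe, hq⟩
    · rw [if_neg he]
      constructor
      · rintro (h | ⟨x, hx, hxe, hq⟩)
        · exact Or.inl h
        · exact Or.inr ⟨x, List.mem_cons_of_mem _ hx, hxe, hq⟩
      · rintro (h | ⟨x, hx, hxe, hq⟩)
        · exact Or.inl h
        · rcases List.mem_cons.mp hx with rfl | hx2
          · exact absurd hxe.symm he
          · exact Or.inr ⟨x, hx2, hxe, hq⟩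

theorem nodup_cFold (l : List (String × String)) (F d0 : PySem.Dict String (PySem.Set (List String)))
    (h : ∀ e, (d0.getD e []).Nodup) : ∀ e, ((cFold l F d0).getD e []).Nodup := by
  induction l generalizing d0 with
  | nil => exact h
  | cons p l ih =>
    have hstep : cFold (p :: l) F d0 =
        cFold l F (d0.insert p.1 (PySem.Set.update (d0.getD p.1 []) (smGet F p.2))) := rfl
    rw [hstep]
    apply ih
    intro e
    rw [PySem.Dict.getD_insert]
    split
    · exact PySem.Set.nodup_update _ _ (h p.1)
    · exact h e

theorem keys_cFold (l : List (String × String)) (F d0 : PySem.Dict String (PySem.Set (List String))) :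
    (cFold l F d0).keys = PySem.Set.update d0.keys (l.map (fun p => p.1)) :=
  PySem.Dict.keys_foldl_insert_key l (fun p => p.1)
    (fun d p => PySem.Set.update (d.getD p.1 []) (smGet F p.2)) d0

theorem coenInit_getD (E : List String) (e : String) : (coenInit E).getD e [] = [] := by
  unfold coenInit
  rw [const_insert_getD]
  split
  · rfl
  · rfl

theorem coenInit_keys (E : List String) : (coenInit E).keys = PySem.Set.ofList E := by
  unfold coenInit
  rw [PySem.Dict.keys_foldl_insert E (fun _ _ => PySem.Set.empty) PySem.Dict.empty]
  rw [PySem.Dict.keys_empty, PySem.Set.update_nil_left]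

theorem set_update_of_subset (s : PySem.Set String) (xs : List String) (h : ∀ x ∈ xs, x ∈ s) :
    PySem.Set.update s xs = s := by
  rw [PySem.Set.update_eq_append_filter]
  have hf : (PySem.Set.ofList xs).filter (fun y => !PySem.Set.contains s y) = [] := by
    rw [List.filter_eq_nil_iff]
    intro a ha
    have hmem : a ∈ s := h a ((PySem.Set.mem_ofList _ _).mp ha)
    simp [PySem.Set.contains_eq_listContains, hmem]
  rw [hf, List.append_nil]

theorem mem_getD_items (d : PySem.Dict String (List (String × String))) (hnd : d.keys.Nodup)
    (t : String) (se : String × String) :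
    se ∈ d.getD t [] ↔ ∃ lst, (t, lst) ∈ d.items ∧ se ∈ lst := by
  constructor
  · intro h
    rcases hg : d.get? t with _ | lst
    · rw [PySem.Dict.getD_eq_get?_getD, hg] at h
      simp at h
    · rw [PySem.Dict.getD_eq_get?_getD, hg] at h
      exact ⟨lst, PySem.Dict.mem_items_of_get?_eq_some _ hg, h⟩
  · rintro ⟨lst, hmem, hin⟩
    rw [PySem.Dict.getD_of_mem_items _ hmem hnd]
    exact hin

theorem canonOut_congr (u v : PySem.Set (List String)) (hu : u.Nodup) (hv : v.Nodup)
    (h : ∀ q, q ∈ u ↔ q ∈ v) : canonOut u = canonOut v := by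
  unfold canonOut canonSet
  have htrans : ∀ a b c : List String, (decide (a ≤ b)) = true → (decide (b ≤ c)) = true →
      (decide (a ≤ c)) = true :=
    fun a b c hab hbc => decide_eq_true (le_trans (of_decide_eq_true hab) (of_decide_eq_true hbc))
  have htotal : ∀ a b : List String, ((decide (a ≤ b)) || (decide (b ≤ a))) = true :=
    fun a b => by rcases le_total a b with h' | h' <;> simp [h']
  have hperm : (u.filter (fun q => !q.isEmpty)).Perm (v.filter (fun q => !q.isEmpty)) := by
    rw [List.perm_ext_iff_of_nodup (hu.filter _) (hv.filter _)]
    intro a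
    simp only [List.mem_filter]
    exact and_congr_left (fun _ => h a)
  have hp : ((u.filter (fun q => !q.isEmpty)).mergeSort (fun a b => decide (a ≤ b))).Perm
      ((v.filter (fun q => !q.isEmpty)).mergeSort (fun a b => decide (a ≤ b))) :=
    ((List.mergeSort_perm _ _).trans hperm).trans (List.mergeSort_perm _ _).symm
  refine List.Perm.eq_of_pairwise (le := fun a b : List String => a ≤ b)
    (fun a b _ _ hab hba => le_antisymm hab hba) ?_ ?_ hp
  · exact (List.pairwise_mergeSort htrans htotal _).imp (fun h' => of_decide_eq_true h')
  · exact (List.pairwise_mergeSort htrans htotal _).imp (fun h' => of_decide_eq_true h')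

theorem out_eq (E : List String) (cA cB : PySem.Dict String (PySem.Set (List String)))
    (hkA : cA.keys = PySem.Set.ofList E) (hkB : cB.keys = PySem.Set.ofList E)
    (hndA : ∀ e, (cA.getD e []).Nodup) (hndB : ∀ e, (cB.getD e []).Nodup)
    (hmem : ∀ e q, q ∈ cA.getD e [] ↔ q ∈ cB.getD e []) :
    cA.items.map (fun p => (p.1, canonOut p.2)) = cB.items.map (fun p => (p.1, canonOut p.2)) := by
  rw [PySem.Dict.items_eq_map_keys cA (by rw [hkA]; exact PySem.Set.nodup_ofList _) [],
    PySem.Dict.items_eq_map_keys cB (by rw [hkB]; exact PySem.Set.nodup_ofList _) []]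
  rw [hkA, hkB, List.map_map, List.map_map]
  apply List.map_congr_left
  intro e _
  simp only [Function.comp]
  congr 1
  exact canonOut_congr _ _ (hndA e) (hndB e) (fun q => hmem e q)

-- the two flattened coenable pair lists range over the same edges
theorem mem_pairsB (ST : List String) (TR : List (String × List (String × String)))
    (x : String × String) :
    x ∈ (predsOf ST TR).items.flatMap (fun tl => tl.2.map (fun se => (se.2, tl.1))) ↔
      ∃ s ∈ ST, x ∈ trGet TR s := by
  constructor
  · intro hx
    rcases List.mem_flatMap.mp hx with ⟨tl, htl, hx2⟩
    rcases List.mem_map.mp hx2 with ⟨se, hse, rfl⟩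
    have hget : se ∈ (predsOf ST TR).getD tl.1 [] := by
      rw [mem_getD_items _ (nodup_keys_preds ST TR)]
      exact ⟨tl.2, by simpa using htl, hse⟩
    rcases (mem_predsGet ST TR tl.1 se).mp hget with ⟨s, hs, et, het, rfl, h2⟩
    refine ⟨s, hs, ?_⟩
    have : ((s, et.1).2, tl.1) = et := by
      rw [← h2]
    rw [this]
    exact het
  · rintro ⟨s, hs, hx⟩
    have hget : (s, x.1) ∈ (predsOf ST TR).getD x.2 [] := by
      rw [mem_predsGet]
      exact ⟨s, hs, x, hx, rfl, rfl⟩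
    rcases (mem_getD_items _ (nodup_keys_preds ST TR) _ _).mp hget with ⟨lst, hmem, hin⟩
    exact List.mem_flatMap.mpr ⟨(x.2, lst), hmem, List.mem_map.mpr ⟨(s, x.1), hin, rfl⟩⟩

theorem ports_eq (ST E : List String) (TR : List (String × List (String × String))) (Gz : List String)
    (hPre : Pre_compute_coenable_sets ST E TR Gz) :
    compute_coenable_sets ST E TR Gz = compute_coenable_sets_alt ST E TR Gz := by
  have hinitS : SndI ST TR Gz (initSeeable ST Gz) := by
    intro s q hq
    rw [smGet_init] at hq
    split at hq
    · rename_i hg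
      rcases List.mem_singleton.mp hq with rfl
      exact Reach.base s hg
    · simp at hq
  have hinitN : NdI (initSeeable ST Gz) := by
    intro s
    rw [smGet_init]
    split <;> simp
  have hinitB : BaseI Gz (initSeeable ST Gz) := by
    intro g hg
    rw [smGet_init, if_pos hg]
    exact List.mem_singleton.mpr rfl
  -- A's fixpoint
  obtain ⟨hA1, hA2, hA3, hA4⟩ := loopA_spec ST Gz TR (fuelA ST TR Gz) (initSeeable ST Gz)
    hinitS hinitN hinitB (by unfold fuelA; omega)
  -- B's fixpoint
  obtain ⟨hB1, hB2, hB3, hB4⟩ := loopB_spec ST Gz TR (fuelB ST TR Gz) (initSeeable ST Gz)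
    (Gz.map (fun g => (g, [])))
    hinitS hinitN hinitB
    (by
      intro p hp
      rcases List.mem_map.mp hp with ⟨g, hg, rfl⟩
      exact Reach.base g hg)
    (by
      intro s hs et het x hx
      rw [smGet_init] at hx
      split at hx
      · rename_i hg
        rcases List.mem_singleton.mp hx with rfl
        exact Or.inr (List.mem_map.mpr ⟨et.2, hg, rfl⟩)
      · simp at hx)
    (by unfold fuelB; simp; omega)
  set FA := loopA ST TR (fuelA ST TR Gz) (initSeeable ST Gz) with hFAdef
  set FB := loopB (predsOf ST TR) (fuelB ST TR Gz) (initSeeable ST Gz) (Gz.map (fun g => (g, [])))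
    with hFBdef
  have hSee : ∀ s q, q ∈ smGet FA s ↔ q ∈ smGet FB s := by
    intro s q
    constructor
    · intro h
      exact reach_mem hB4 hB3 s q (hA1 s q h)
    · intro h
      exact reach_mem hA4 hA3 s q (hB1 s q h)
  -- rewrite the two coenable folds into the common flattened form
  have hcA : ST.foldl (fun d s =>
        (trGet TR s).foldl (fun d et =>
          d.insert et.1 (PySem.Set.update (d.getD et.1 []) (smGet FA et.2))) d) (coenInit E) =
      cFold (ST.flatMap (fun s => trGet TR s)) FA (coenInit E) := by
    unfold cFold
    rw [List.foldl_flatMap]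
  have hcB : (predsOf ST TR).items.foldl (fun d tl =>
        tl.2.foldl (fun d se =>
          d.insert se.2 (PySem.Set.update (d.getD se.2 []) (smGet FB tl.1))) d) (coenInit E) =
      cFold ((predsOf ST TR).items.flatMap (fun tl => tl.2.map (fun se => (se.2, tl.1)))) FB
        (coenInit E) := by
    unfold cFold
    rw [List.foldl_flatMap]
    congr 1
    funext d tl
    rw [List.foldl_map]
  show (ST.foldl (fun d s =>
      (trGet TR s).foldl (fun d et =>
        d.insert et.1 (PySem.Set.update (d.getD et.1 []) (smGet FA et.2))) d)
      (coenInit E)).items.map (fun p => (p.1, canonOut p.2)) =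
    ((predsOf ST TR).items.foldl (fun d tl =>
      tl.2.foldl (fun d se =>
        d.insert se.2 (PySem.Set.update (d.getD se.2 []) (smGet FB tl.1))) d)
      (coenInit E)).items.map (fun p => (p.1, canonOut p.2))
  rw [hcA, hcB]
  apply out_eq
  · rw [keys_cFold, coenInit_keys]
    apply set_update_of_subset
    intro x hx
    rcases List.mem_map.mp hx with ⟨p, hp, rfl⟩
    rcases List.mem_flatMap.mp hp with ⟨s, hs, hps⟩
    exact (PySem.Set.mem_ofList _ _).mpr (hPre s hs p hps).1
  · rw [keys_cFold, coenInit_keys]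
    apply set_update_of_subset
    intro x hx
    rcases List.mem_map.mp hx with ⟨p, hp, rfl⟩
    rcases (mem_pairsB ST TR p).mp hp with ⟨s, hs, hps⟩
    exact (PySem.Set.mem_ofList _ _).mpr (hPre s hs p hps).1
  · exact nodup_cFold _ _ _ (fun e => by rw [coenInit_getD]; exact List.nodup_nil)
  · exact nodup_cFold _ _ _ (fun e => by rw [coenInit_getD]; exact List.nodup_nil)
  · intro e q
    rw [mem_cFold, mem_cFold, coenInit_getD]
    simp only [List.not_mem_nil, false_or]
    constructor
    · rintro ⟨p, hp, rfl, hq⟩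
      rcases List.mem_flatMap.mp hp with ⟨s, hs, hps⟩
      exact ⟨p, (mem_pairsB ST TR p).mpr ⟨s, hs, hps⟩, rfl, (hSee p.2 q).mp hq⟩
    · rintro ⟨p, hp, rfl, hq⟩
      rcases (mem_pairsB ST TR p).mp hp with ⟨s, hs, hps⟩
      exact ⟨p, List.mem_flatMap.mpr ⟨s, hs, hps⟩, rfl, (hSee p.2 q).mpr hq⟩

-- ===== VERDICT (by name: the statement is the Claim_ definition above) =====
theorem compute_coenable_sets_spec : Claim_equal_compute_coenable_sets := by
  intro states events transitions goal_states _ hPre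
  exact ports_eq states events transitions goal_states hPre
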